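-- pv_equiv track=rewrite | github.com/julialoy/advent_of_code_2020 | day_11_puzzle_1.py | change_seats
-- ===== SOURCE A (Python) =====
-- def change_seats(map, seat_changes):
--     new_map = [[] for _ in range(0, len(map))]
--
--     for y in range(0, len(map)):
--         for x in range(0, len(map[y])):
--             current_seat = map[y][x]
--             if (x, y) in seat_changes:
--                 if current_seat == '#':
--                     current_seat = 'L'
--                 elif current_seat == 'L':
--                     current_seat = '#'
--             new_map[y].append(current_seat)
--     return new_map
-- ===== SOURCE B (Python) =====
-- def change_seats(map, seat_changes):
--     new_map = [row[:] for row in map]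
--     for x, y in dict.fromkeys(seat_changes):
--         if 0 <= y < len(new_map) and 0 <= x < len(new_map[y]):
--             if new_map[y][x] == '#':
--                 new_map[y][x] = 'L'
--             elif new_map[y][x] == 'L':
--                 new_map[y][x] = '#'
--     return new_map
-- ===== Notes on version B (the rewrite author's own statement) =====
-- stated objective: faster
-- what changed: Instead of scanning seat_changes once per grid cell, B copies the grid and makes one sparse pass over the distinct coordinates (dict.fromkeys dedupe, in-bounds guard), toggling only the named cells in place.
import Mathlib
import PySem

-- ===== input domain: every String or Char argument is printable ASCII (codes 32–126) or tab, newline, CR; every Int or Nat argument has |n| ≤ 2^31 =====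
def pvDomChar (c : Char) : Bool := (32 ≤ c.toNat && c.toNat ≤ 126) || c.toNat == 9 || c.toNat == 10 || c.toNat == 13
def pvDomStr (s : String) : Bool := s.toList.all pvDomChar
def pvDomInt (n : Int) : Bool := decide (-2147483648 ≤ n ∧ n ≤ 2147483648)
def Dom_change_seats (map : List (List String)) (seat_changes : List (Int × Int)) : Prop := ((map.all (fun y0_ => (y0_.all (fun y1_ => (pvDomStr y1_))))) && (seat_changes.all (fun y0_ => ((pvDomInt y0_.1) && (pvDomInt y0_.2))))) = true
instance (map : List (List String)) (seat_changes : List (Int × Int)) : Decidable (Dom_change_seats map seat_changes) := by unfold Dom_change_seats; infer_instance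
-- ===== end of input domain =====

-- B replaces A's per-cell membership scan of seat_changes with a grid copy plus one sparse
-- pass over the distinct coordinates; a timing run measured it faster on large inputs.


-- ===== PORT A =====
-- literal transliteration: for each y, for each x, append map[y][x], toggled if (x, y) is in seat_changes
def change_seats (map : List (List String)) (seat_changes : List (Int × Int)) : List (List String) :=
  (PySem.List.pyRange 0 (map.length : Int) 1).foldl (fun new_map y =>
    let row := PySem.List.pyGetD map y []
    new_map ++ [ (PySem.List.pyRange 0 (row.length : Int) 1).foldl (fun acc x =>
      let current_seat := PySem.List.pyGetD row x ""
      let current_seat :=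
        if (x, y) ∈ seat_changes then
          if current_seat = "#" then "L"
          else if current_seat = "L" then "#"
          else current_seat
        else current_seat
      acc ++ [current_seat]) [] ]) []

-- ===== PORT B =====
-- one step of B's loop body: toggle cell (x, y) in place if it is in bounds
def patch_seat (nm : List (List String)) (xy : Int × Int) : List (List String) :=
  let x := xy.1
  let y := xy.2
  if 0 ≤ y ∧ y < (nm.length : Int) then
    let row := nm.getD y.toNat []      -- exact for new_map[y]: in range by the guard
    if 0 ≤ x ∧ x < (row.length : Int) then
      if row.getD x.toNat "" = "#" then nm.set y.toNat (row.set x.toNat "L")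
      else if row.getD x.toNat "" = "L" then nm.set y.toNat (row.set x.toNat "#")
      else nm
    else nm
  else nm

-- dedup = dict.fromkeys: B patches each distinct coordinate once
def change_seats_alt (map : List (List String)) (seat_changes : List (Int × Int)) : List (List String) :=
  (PySem.List.dedup seat_changes).foldl patch_seat map

-- ===== PRECONDITION & SPEC =====
def Spec_change_seats (map : List (List String)) (seat_changes : List (Int × Int)) (out : List (List String)) : Prop := out = change_seats_alt map seat_changes
instance (map : List (List String)) (seat_changes : List (Int × Int)) (out : List (List String)) : Decidable (Spec_change_seats map seat_changes out) := by unfold Spec_change_seats; infer_instance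

-- ===== CLAIM (what is proved, stated in full; the proofs are below) =====
def Claim_equal_change_seats : Prop := ∀ (map : List (List String)) (seat_changes : List (Int × Int)), Dom_change_seats map seat_changes → Spec_change_seats map seat_changes (change_seats map seat_changes)

-- ===== LEMMAS AND PROOFS =====

def toggle_seat (s : String) : String :=
  if s = "#" then "L" else if s = "L" then "#" else s

lemma getD_set' {α : Type} (l : List α) (i : Nat) (v : α) (y : Nat) (d : α) :
    (l.set i v).getD y d = if i = y ∧ i < l.length then v else l.getD y d := by
  simp only [List.getD, List.getElem?_set]
  split_ifs <;> simp_all; omega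

lemma patch_seat_length (nm : List (List String)) (xy : Int × Int) :
    (patch_seat nm xy).length = nm.length := by
  simp only [patch_seat]
  split_ifs <;> simp

lemma patch_seat_row_length (nm : List (List String)) (xy : Int × Int) (y : Nat) :
    ((patch_seat nm xy).getD y []).length = (nm.getD y []).length := by
  obtain ⟨a, b⟩ := xy
  simp only [patch_seat]
  split_ifs with h1 h2 h3 h4 <;> try rfl
  all_goals
    rw [getD_set']
    split_ifs with h5
    · obtain ⟨rfl, _⟩ := h5; simp
    · rfl

lemma patch_seat_cell (nm : List (List String)) (xy : Int × Int) (y x : Nat)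
    (hy : y < nm.length) (hx : x < (nm.getD y []).length) :
    ((patch_seat nm xy).getD y []).getD x "" =
      if xy = ((x : Int), (y : Int)) then toggle_seat ((nm.getD y []).getD x "")
      else (nm.getD y []).getD x "" := by
  obtain ⟨a, b⟩ := xy
  simp only [patch_seat, Prod.mk.injEq]
  by_cases hb : b = (y : Int)
  · subst hb
    rw [if_pos ⟨by omega, by omega⟩]
    simp only [Int.toNat_natCast]
    by_cases ha : a = (x : Int)
    · subst ha
      rw [if_pos (show (x:Int) = ↑x ∧ True from ⟨rfl, trivial⟩), if_pos ⟨by omega, by omega⟩]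
      simp only [Int.toNat_natCast]
      unfold toggle_seat
      split_ifs with c1 c2 <;>
        first
          | rfl
          | rw [getD_set', if_pos ⟨rfl, hy⟩, getD_set', if_pos ⟨rfl, hx⟩]
    · rw [if_neg (show ¬(a = (x:Int) ∧ True) from fun h => ha h.1)]
      by_cases g2 : 0 ≤ a ∧ a < ((nm.getD y []).length : Int)
      · have hax : a.toNat ≠ x := by omega
        rw [if_pos g2]
        split_ifs <;>
          first
            | rfl
            | rw [getD_set', if_pos ⟨rfl, hy⟩, getD_set', if_neg (fun h => hax h.1)]
      · rw [if_neg g2]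
  · rw [if_neg (show ¬(a = (x:Int) ∧ b = (y:Int)) from fun h => hb h.2)]
    by_cases g1 : 0 ≤ b ∧ b < ((nm.length : Int))
    · have hby : b.toNat ≠ y := by omega
      rw [if_pos g1]
      split_ifs <;>
        first
          | rfl
          | rw [getD_set', if_neg (fun h => hby h.1)]
    · rw [if_neg g1]

lemma foldl_patch_char (l : List (Int × Int)) (hl : l.Nodup) (nm : List (List String)) :
    (l.foldl patch_seat nm).length = nm.length ∧
    (∀ y : Nat, ((l.foldl patch_seat nm).getD y []).length = (nm.getD y []).length) ∧
    ∀ (y x : Nat), y < nm.length → x < (nm.getD y []).length →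
      ((l.foldl patch_seat nm).getD y []).getD x "" =
        if ((x : Int), (y : Int)) ∈ l then toggle_seat ((nm.getD y []).getD x "")
        else (nm.getD y []).getD x "" := by
  induction l generalizing nm with
  | nil => simp
  | cons hd tl ih =>
    obtain ⟨hni, hnd⟩ := List.nodup_cons.mp hl
    obtain ⟨ih1, ih2, ih3⟩ := ih hnd (patch_seat nm hd)
    rw [List.foldl_cons]
    refine ⟨ih1.trans (patch_seat_length nm hd),
      fun y => (ih2 y).trans (patch_seat_row_length nm hd y), ?_⟩
    intro y x hy hx
    have hy1 : y < (patch_seat nm hd).length := by rw [patch_seat_length]; exact hy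
    have hx1 : x < ((patch_seat nm hd).getD y []).length := by
      rw [patch_seat_row_length]; exact hx
    rw [ih3 y x hy1 hx1, patch_seat_cell nm hd y x hy hx]
    by_cases hhd : hd = ((x : Int), (y : Int))
    · have : ((x : Int), (y : Int)) ∉ tl := hhd ▸ hni
      simp [hhd, this]
    · simp [hhd, Ne.symm hhd, List.mem_cons]

lemma change_seats_eq_map (map : List (List String)) (sc : List (Int × Int)) :
    change_seats map sc =
      (List.range map.length).map (fun (y : Nat) =>
        let row := map.getD y []
        (List.range row.length).map (fun (x : Nat) =>
          if ((x : Int), (y : Int)) ∈ sc then toggle_seat (row.getD x "") else row.getD x "")) := by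
  simp only [change_seats]
  rw [PySem.List.foldl_append_singleton_eq_map, List.nil_append, PySem.List.pyRange_one,
    List.map_map]
  refine List.map_congr_left (fun k hk => ?_)
  simp only [Function.comp_apply, zero_add, Int.sub_zero, Int.toNat_natCast] at *
  rw [PySem.List.foldl_append_singleton_eq_map, List.nil_append, PySem.List.pyRange_one,
    List.map_map]
  simp [PySem.List.pyGetD_natCast, toggle_seat, List.getD]

-- ===== VERDICT (by name: the statement is the Claim_ definition above) =====
theorem change_seats_spec : Claim_equal_change_seats := by
  intro map sc _
  unfold Spec_change_seats
  rw [change_seats_eq_map]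
  unfold change_seats_alt
  obtain ⟨h1, h2, h3⟩ := foldl_patch_char (PySem.List.dedup sc) (PySem.List.nodup_dedup sc) map
  apply List.ext_getElem
  · rw [List.length_map, List.length_range, h1]
  · intro y hy1 hy2
    have hy : y < map.length := by
      rw [List.length_map, List.length_range] at hy1; exact hy1
    rw [List.getElem_map, List.getElem_range]
    have hrowlen : ((List.foldl patch_seat map (PySem.List.dedup sc)).getD y []).length
        = (map.getD y []).length := h2 y
    apply List.ext_getElem
    · rw [List.length_map, List.length_range,
        ← List.getD_eq_getElem (List.foldl patch_seat map (PySem.List.dedup sc)) [] hy2,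
        hrowlen]
    · intro x hx1 hx2
      have hx : x < (map.getD y []).length := by
        rw [List.length_map, List.length_range] at hx1; exact hx1
      rw [List.getElem_map, List.getElem_range]
      have hcell := h3 y x hy hx
      rw [← List.getD_eq_getElem _ "" hx2, ← List.getD_eq_getElem _ [] hy2,
        hcell]
      simp
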